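-- pv_equiv track=rewrite | github.com/jmsung/einstein | scripts/difference_bases/imperfect_5mark_search.py | compute_c
-- ===== SOURCE A (Python) =====
-- def compute_c(A) -> int:
--     """Largest L such that {1, ..., L} ⊆ (A-A)⁺."""
--     diffs = set()
--     for i in range(len(A)):
--         for j in range(i):
--             d = A[i] - A[j]
--             if d > 0:
--                 diffs.add(d)
--     L = 0
--     while (L + 1) in diffs:
--         L += 1
--     return L
-- ===== SOURCE B (Python) =====
-- def compute_c(A) -> int:
--     """Largest L such that {1, ..., L} ⊆ (A-A)⁺."""
--     first = {}
--     for i, x in enumerate(A):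
--         if x not in first:
--             first[x] = i
--     n = len(A)
--     E = list(enumerate(A))
--     E.reverse()  # witnesses (j < i) tend to have a large i: short-circuit sooner
--     d = 1
--     while any(first.get(x - d, n) < i for i, x in E):
--         d += 1
--     return d - 1
-- ===== Notes on version B (the rewrite author's own statement) =====
-- stated objective: faster
-- what changed: Instead of materialising the full O(n^2) set of pairwise differences and then scanning L upward, B builds a first-occurrence index of the values once and tests candidate widths d = 1,2,... directly, short-circuiting on the first pair (an earlier occurrence of x-d before x, scanned from the end of the list) that realises d.
import Mathlib
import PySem

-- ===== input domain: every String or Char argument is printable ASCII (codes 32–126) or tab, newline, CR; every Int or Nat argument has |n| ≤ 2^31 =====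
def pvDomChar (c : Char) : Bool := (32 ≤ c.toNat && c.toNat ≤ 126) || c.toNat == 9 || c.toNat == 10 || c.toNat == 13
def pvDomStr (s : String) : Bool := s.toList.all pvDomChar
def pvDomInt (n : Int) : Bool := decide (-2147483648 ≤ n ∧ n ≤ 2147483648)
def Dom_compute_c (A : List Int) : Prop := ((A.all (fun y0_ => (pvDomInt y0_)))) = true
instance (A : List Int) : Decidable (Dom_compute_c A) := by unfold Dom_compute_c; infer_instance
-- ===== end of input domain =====

-- B replaces A's materialised O(n^2) pairwise-difference set by a first-occurrence index per value
-- and a short-circuiting per-candidate membership test (measured faster on large inputs; same values).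

-- ===== PORT A =====
-- the 'while (L+1) in diffs: L += 1' loop; the fuel only makes the recursion total
def compute_c_whileLoop (diffs : PySem.Set Int) (L : Int) : Nat → Int
  | 0 => L
  | fuel + 1 => if PySem.Set.contains diffs (L + 1) then compute_c_whileLoop diffs (L + 1) fuel else L

def compute_c_diffs (A : List Int) : PySem.Set Int :=
  (PySem.List.pyRange 0 (A.length : Int) 1).foldl
    (fun s i =>
      (PySem.List.pyRange 0 i 1).foldl
        (fun s j =>
          let d := PySem.List.pyGetD A i 0 - PySem.List.pyGetD A j 0
          if d > 0 then PySem.Set.add s d else s)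
        s)
    PySem.Set.empty

def compute_c (A : List Int) : Int :=
  compute_c_whileLoop (compute_c_diffs A) 0 8589934593

-- ===== PORT B =====
-- first-occurrence index: for i, x in enumerate(A): if x not in first: first[x] = i
def compute_c_alt_first (A : List Int) : PySem.Dict Int Int :=
  (PySem.List.enumerate A).foldl
    (fun f p => if PySem.Dict.contains f p.2 then f else PySem.Dict.insert f p.2 p.1)
    PySem.Dict.empty

-- any(first.get(x - d, n) < i for i, x in E) over E = reversed(list(enumerate(A)))
def compute_c_alt_check (first : PySem.Dict Int Int) (n : Int) (A : List Int) (d : Int) : Bool :=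
  ((PySem.List.enumerate A).reverse).any (fun p => decide (PySem.Dict.getD first (p.2 - d) n < p.1))

-- the 'while any(...): d += 1' loop; the fuel only makes the recursion total
def compute_c_alt_loop (check : Int → Bool) (d : Int) : Nat → Int
  | 0 => d - 1
  | fuel + 1 => if check d then compute_c_alt_loop check (d + 1) fuel else d - 1

def compute_c_alt (A : List Int) : Int :=
  let first := compute_c_alt_first A
  compute_c_alt_loop (compute_c_alt_check first (A.length : Int) A) 1 8589934593

-- ===== PRECONDITION & SPEC =====
def Spec_compute_c (A : List Int) (out : Int) : Prop := out = compute_c_alt A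
instance (A : List Int) (out : Int) : Decidable (Spec_compute_c A out) := by unfold Spec_compute_c; infer_instance

-- ===== CLAIM (what is proved, stated in full; the proofs are below) =====
def Claim_equal_compute_c : Prop := ∀ (A : List Int), Dom_compute_c A → Spec_compute_c A (compute_c A)

-- ===== LEMMAS AND PROOFS =====

-- generic membership through a fold whose step adds exactly the elements satisfying P
theorem mem_foldl_of_step {β : Type} (x : Int) (P : β → Prop)
    (g : PySem.Set Int → β → PySem.Set Int)
    (h : ∀ (s : PySem.Set Int) (b : β), x ∈ g s b ↔ x ∈ s ∨ P b) :
    ∀ (l : List β) (s : PySem.Set Int), x ∈ l.foldl g s ↔ x ∈ s ∨ ∃ b ∈ l, P b := by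
  intro l
  induction l with
  | nil => intro s; simp
  | cons b l ih =>
      intro s
      simp only [List.foldl_cons, ih, h, List.mem_cons]
      constructor
      · rintro ((hs | hb) | ⟨c, hc, hP⟩)
        · exact Or.inl hs
        · exact Or.inr ⟨b, Or.inl rfl, hb⟩
        · exact Or.inr ⟨c, Or.inr hc, hP⟩
      · rintro (hs | ⟨c, (rfl | hc), hP⟩)
        · exact Or.inl (Or.inl hs)
        · exact Or.inl (Or.inr hP)
        · exact Or.inr ⟨c, hc, hP⟩

theorem mem_compute_c_diffs (A : List Int) (x : Int) :
    x ∈ compute_c_diffs A ↔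
      ∃ i : Int, (0 ≤ i ∧ i < (A.length : Int)) ∧ ∃ j : Int, (0 ≤ j ∧ j < i) ∧
        0 < PySem.List.pyGetD A i 0 - PySem.List.pyGetD A j 0 ∧
        PySem.List.pyGetD A i 0 - PySem.List.pyGetD A j 0 = x := by
  unfold compute_c_diffs
  rw [mem_foldl_of_step x
    (fun i => ∃ j : Int, (0 ≤ j ∧ j < i) ∧
        0 < PySem.List.pyGetD A i 0 - PySem.List.pyGetD A j 0 ∧
        PySem.List.pyGetD A i 0 - PySem.List.pyGetD A j 0 = x)
    _ ?_]
  · simp [PySem.List.mem_pyRange_one, PySem.Set.empty]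
  · intro s i
    rw [mem_foldl_of_step x
      (fun j => 0 < PySem.List.pyGetD A i 0 - PySem.List.pyGetD A j 0 ∧
        PySem.List.pyGetD A i 0 - PySem.List.pyGetD A j 0 = x) _ ?_]
    · simp [PySem.List.mem_pyRange_one]
    · intro s j
      dsimp only
      split_ifs with hpos
      · rw [PySem.Set.mem_add]
        constructor
        · rintro (hs | rfl)
          · exact Or.inl hs
          · exact Or.inr ⟨hpos, rfl⟩
        · rintro (hs | ⟨_, rfl⟩)
          · exact Or.inl hs
          · exact Or.inr rfl
      · constructor
        · exact Or.inl
        · rintro (hs | ⟨h1, h2⟩)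
          · exact hs
          · exact absurd h1 hpos

-- the first-occurrence dict looks up the first index of v
theorem compute_c_first_aux (v : Int) :
    ∀ (xs : List Int) (s : Int) (f : PySem.Dict Int Int),
    PySem.Dict.get? ((PySem.List.enumerate xs s).foldl
        (fun f p => if PySem.Dict.contains f p.2 then f else PySem.Dict.insert f p.2 p.1) f) v =
      (PySem.Dict.get? f v).or ((PySem.List.index? xs v).map (fun (k : Nat) => s + (k : Int))) := by
  intro xs
  induction xs with
  | nil => intro s f; simp [PySem.List.enumerate_nil, PySem.List.index?_eq_idxOf?]
  | cons x xs ih =>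
      intro s f
      rw [PySem.List.enumerate_cons, List.foldl_cons, ih]
      have hred : (if PySem.Dict.contains f ((s, x) : Int × Int).2 then f
          else PySem.Dict.insert f ((s, x) : Int × Int).2 ((s, x) : Int × Int).1)
          = (if PySem.Dict.contains f x then f else PySem.Dict.insert f x s) := rfl
      rw [hred]
      by_cases hx : x = v
      · subst hx
        rw [PySem.List.index?_cons_self]
        by_cases hc : PySem.Dict.contains f x = true
        · rw [if_pos hc]
          have hs' : (PySem.Dict.get? f x).isSome := by
            rw [← PySem.Dict.contains_eq_isSome_get?]; exact hc
          obtain ⟨w, hw⟩ := Option.isSome_iff_exists.mp hs'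
          rw [hw]
          rfl
        · rw [if_neg hc, PySem.Dict.get?_insert_self,
            (PySem.Dict.get?_eq_none_iff_contains f x).mpr (by simpa using hc)]
          simp
      · rw [PySem.List.index?_cons_of_ne xs hx]
        have hstep : PySem.Dict.get? (if PySem.Dict.contains f x then f
            else PySem.Dict.insert f x s) v = PySem.Dict.get? f v := by
          split_ifs with hc
          · rfl
          · exact PySem.Dict.get?_insert_of_ne f s (fun h => hx h.symm)
        rw [hstep, Option.map_map]
        congr 1
        apply Option.map_congr
        intro k _
        simp only [Function.comp_apply]
        push_cast
        ring

theorem compute_c_first_get? (A : List Int) (v : Int) :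
    PySem.Dict.get? (compute_c_alt_first A) v = (PySem.List.index? A v).map (fun (k : Nat) => (k : Int)) := by
  unfold compute_c_alt_first
  rw [compute_c_first_aux v A 0 PySem.Dict.empty]
  simp

-- the dict lookup tested against an index i detects 'some earlier occurrence of v'
theorem compute_c_first_lookup (A : List Int) (v : Int) (i : Int)
    (_hi : 0 ≤ i) (hin : i < (A.length : Int)) :
    PySem.Dict.getD (compute_c_alt_first A) v (A.length : Int) < i ↔
      ∃ j : Nat, j < A.length ∧ (j : Int) < i ∧ A.getD j 0 = v := by
  rw [PySem.Dict.getD_eq_get?_getD, compute_c_first_get? A v]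
  cases h : PySem.List.index? A v with
  | none =>
      simp only [Option.map_none, Option.getD_none]
      constructor
      · intro hlt; omega
      · rintro ⟨j, hj, hji, hv⟩
        exfalso
        have : v ∈ A := by
          rw [← hv]
          rw [List.getD_eq_getElem A 0 hj]
          exact List.getElem_mem hj
        exact (PySem.List.index?_eq_none_iff A v).mp h this
  | some k =>
      obtain ⟨hk, hxv, hmin⟩ := PySem.List.getElem_of_index?_eq_some h
      simp only [Option.map_some, Option.getD_some]
      constructor
      · intro hki
        exact ⟨k, hk, hki, by rw [List.getD_eq_getElem A 0 hk]; exact hxv⟩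
      · rintro ⟨j, hj, hji, hv⟩
        have hkj : k ≤ j := by
          by_contra hlt
          exact hmin j (by omega) (by rw [← List.getD_eq_getElem A 0 hj]; exact hv)
        omega

-- B's check at width d equals membership of d in A's difference set, for positive d
theorem check_eq_contains (A : List Int) (d : Int) (hd : 0 < d) :
    PySem.Set.contains (compute_c_diffs A) d =
      compute_c_alt_check (compute_c_alt_first A) ((A.length : Int)) A d := by
  rw [Bool.eq_iff_iff, PySem.Set.contains_iff, mem_compute_c_diffs]
  unfold compute_c_alt_check
  rw [List.any_reverse, List.any_eq_true]
  constructor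
  · rintro ⟨i, ⟨hi0, hin⟩, j, ⟨hj0, hji⟩, hpos, heq⟩
    refine ⟨((i : Int), A.getD i.toNat 0), ?_, ?_⟩
    · rw [PySem.List.mem_enumerate_iff]
      refine ⟨i.toNat, by omega, ?_⟩
      rw [Prod.ext_iff]
      have hlt : i.toNat < A.length := by omega
      exact ⟨by simp; omega, (List.getD_eq_getElem A 0 hlt)⟩
    · rw [decide_eq_true_iff]
      have hvi : PySem.List.pyGetD A i 0 = A.getD i.toNat 0 := PySem.List.pyGetD_of_nonneg A 0 hi0
      have hvj : PySem.List.pyGetD A j 0 = A.getD j.toNat 0 := PySem.List.pyGetD_of_nonneg A 0 hj0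
      rw [compute_c_first_lookup A _ i hi0 hin]
      refine ⟨j.toNat, by omega, by omega, ?_⟩
      rw [← hvj]
      simp only
      omega
  · rintro ⟨p, hp, hdec⟩
    rw [PySem.List.mem_enumerate_iff] at hp
    obtain ⟨k, hk, rfl⟩ := hp
    rw [decide_eq_true_iff] at hdec
    simp only [zero_add] at hdec ⊢
    rw [compute_c_first_lookup A _ (k : Int) (by omega) (by omega)] at hdec
    obtain ⟨j, hj, hjk, hv⟩ := hdec
    have hgk : A.getD k 0 = A[k] := List.getD_eq_getElem A 0 hk
    refine ⟨(k : Int), ⟨by omega, by omega⟩, (j : Int), ⟨by omega, by omega⟩, ?_, ?_⟩ <;>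
    · rw [PySem.List.pyGetD_of_nonneg A 0 (by omega), PySem.List.pyGetD_of_nonneg A 0 (by omega)]
      simp only [Int.toNat_natCast]
      omega
  -- note: 0 < d makes the positivity side-condition of the A-side set automatic

-- the two fueled loops agree step for step
theorem loops_agree (diffs : PySem.Set Int) (q : Int → Bool)
    (h : ∀ d, 0 < d → PySem.Set.contains diffs d = q d) :
    ∀ (fuel : Nat) (L : Int), 0 ≤ L →
      compute_c_whileLoop diffs L fuel = compute_c_alt_loop q (L + 1) fuel := by
  intro fuel
  induction fuel with
  | zero => intro L _; simp [compute_c_whileLoop, compute_c_alt_loop]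
  | succ fuel ih =>
      intro L hL
      rw [compute_c_whileLoop, compute_c_alt_loop, h (L + 1) (by omega)]
      by_cases hq : q (L + 1) = true
      · rw [hq]; simp only [if_true]; exact ih (L + 1) (by omega)
      · rw [Bool.not_eq_true] at hq; rw [hq]; simp

-- ===== VERDICT (by name: the statement is the Claim_ definition above) =====
theorem compute_c_spec : Claim_equal_compute_c := by
  intro A _
  unfold Spec_compute_c compute_c compute_c_alt
  exact loops_agree (compute_c_diffs A) _
    (fun d hd => check_eq_contains A d hd) 8589934593 0 le_rfl
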